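-- pv_equiv track=rewrite | github.com/lewis6991/tcl-ls | src/tcl_lsp/analysis/facts/collector.py | _namespace_candidates
-- ===== SOURCE A (Python) =====
-- def _namespace_candidates(namespace: str) -> tuple[str, ...]:
--     if namespace == '::':
--         return ('::',)
--
--     namespace_segments = [segment for segment in namespace.split('::') if segment]
--     candidates: list[str] = []
--     while namespace_segments:
--         candidates.append('::' + '::'.join(namespace_segments))
--         namespace_segments = namespace_segments[:-1]
--     candidates.append('::')
--     return tuple(candidates)
-- ===== SOURCE B (Python) =====
-- def _namespace_candidates(namespace: str) -> tuple[str, ...]: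
--     if namespace == '::':
--         return ('::',)
--     prefixes = []
--     running = ''
--     for segment in namespace.split('::'):
--         if not segment:
--             continue
--         running = running + '::' + segment
--         prefixes.append(running)
--     prefixes.reverse()
--     prefixes.append('::')
--     return tuple(prefixes)
-- ===== Notes on version B (the rewrite author's own statement) =====
-- stated objective: alternative
-- what changed: B builds each prefix incrementally front-to-back with a running string (skipping empty segments in the loop) and reverses the list once, instead of A's re-joining all remaining segments and re-slicing the segment list on every iteration of a back-to-front while loop.
import Mathlib
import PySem

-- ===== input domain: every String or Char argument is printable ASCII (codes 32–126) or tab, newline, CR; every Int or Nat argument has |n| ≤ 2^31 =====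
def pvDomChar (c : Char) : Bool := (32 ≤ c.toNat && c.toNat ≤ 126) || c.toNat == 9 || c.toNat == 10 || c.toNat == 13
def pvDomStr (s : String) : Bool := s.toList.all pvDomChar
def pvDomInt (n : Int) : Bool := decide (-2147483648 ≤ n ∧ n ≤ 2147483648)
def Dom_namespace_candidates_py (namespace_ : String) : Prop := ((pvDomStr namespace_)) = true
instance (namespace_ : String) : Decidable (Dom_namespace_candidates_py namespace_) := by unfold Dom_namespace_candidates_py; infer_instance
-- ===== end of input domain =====

-- B builds the prefixes incrementally front-to-back with a running string and reverses once
-- (O(total length) instead of re-joining the remaining segments on every iteration): objective 'alternative'.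

-- ===== PORT A =====
-- the `while namespace_segments:` loop: append '::' + '::'.join(segments), then drop the last segment
def pvAloop (segs : List String) (cands : List String) : List String :=
  if segs.isEmpty then cands
  else pvAloop segs.dropLast (cands ++ ["::" ++ PySem.Str.join "::" segs])
termination_by segs.length
decreasing_by
  cases segs with
  | nil => simp_all
  | cons s rest => simp [List.length_dropLast]

def namespace_candidates_py (namespace_ : String) : List String :=
  if namespace_ = "::" then ["::"]
  else
    let segs := ((PySem.Str.split? namespace_ "::").getD []).filter (fun s => !(s == ""))
    pvAloop segs [] ++ ["::"]

-- ===== PORT B =====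
-- loop body: skip empty segments, extend the running prefix, record it
def pvBstep (st : String × List String) (seg : String) : String × List String :=
  if seg == "" then st
  else
    let r := st.1 ++ "::" ++ seg
    (r, st.2 ++ [r])

def namespace_candidates_py_alt (namespace_ : String) : List String :=
  if namespace_ = "::" then ["::"]
  else
    let st := ((PySem.Str.split? namespace_ "::").getD []).foldl pvBstep ("", [])
    st.2.reverse ++ ["::"]

-- ===== PRECONDITION & SPEC =====
def Spec_namespace_candidates_py (namespace_ : String) (out : List String) : Prop := out = namespace_candidates_py_alt namespace_
instance (namespace_ : String) (out : List String) : Decidable (Spec_namespace_candidates_py namespace_ out) := by unfold Spec_namespace_candidates_py; infer_instance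

-- ===== CLAIM (what is proved, stated in full; the proofs are below) =====
def Claim_equal_namespace_candidates_py : Prop := ∀ (namespace_ : String), Dom_namespace_candidates_py namespace_ → Spec_namespace_candidates_py namespace_ (namespace_candidates_py namespace_)

-- ===== LEMMAS AND PROOFS =====

-- running-prefix list produced by B's loop starting from running string r
def pvG (r : String) : List String → List String
  | [] => []
  | s :: rest => (r ++ "::" ++ s) :: pvG (r ++ "::" ++ s) rest

-- plain fold of B's running-string update
def pvF (r : String) (segs : List String) : String :=
  segs.foldl (fun a s => a ++ "::" ++ s) r

theorem pvBstep_skip_empty (pieces : List String) (st : String × List String) :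
    pieces.foldl pvBstep st = (pieces.filter (fun s => !(s == ""))).foldl pvBstep st := by
  induction pieces generalizing st with
  | nil => rfl
  | cons p rest ih =>
    by_cases hp : p = ""
    · subst hp
      simpa [pvBstep] using ih st
    · simp [hp, List.foldl_cons, ih]

theorem pvBfold_eq (segs : List String) : ∀ (r : String) (acc : List String),
    (∀ s ∈ segs, s ≠ "") →
    segs.foldl pvBstep (r, acc) = (pvF r segs, acc ++ pvG r segs) := by
  induction segs with
  | nil => intro r acc _; simp [pvF, pvG]
  | cons s rest ih =>
    intro r acc h
    have hs : s ≠ "" := h s (by simp)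
    have := ih (r ++ "::" ++ s) (acc ++ [r ++ "::" ++ s]) (fun t ht => h t (by simp [ht]))
    simp [List.foldl_cons, pvBstep, hs, pvF, pvG, this]

theorem pvG_snoc (xs : List String) : ∀ (r : String) (x : String),
    pvG r (xs ++ [x]) = pvG r xs ++ [pvF r (xs ++ [x])] := by
  induction xs with
  | nil => intro r x; simp [pvG, pvF]
  | cons s rest ih => intro r x; simp [pvG, pvF, List.foldl_cons, ih]

theorem pvF_eq_join (segs : List String) (hne : segs ≠ []) :
    ∀ r : String, pvF r segs = r ++ "::" ++ PySem.Str.join "::" segs := by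
  induction segs with
  | nil => exact absurd rfl hne
  | cons s rest ih =>
    intro r
    cases rest with
    | nil => simp [pvF, PySem.Str.join]
    | cons t rr =>
      have h1 := ih (by simp) (r ++ "::" ++ s)
      have h2 : pvF r (s :: t :: rr) = pvF (r ++ "::" ++ s) (t :: rr) := rfl
      rw [h2, h1]
      apply String.toList_inj.mp
      simp [PySem.Str.toList_join, PySem.Chars.join_cons_cons]

theorem pvAloop_nil (cands : List String) : pvAloop [] cands = cands := by
  rw [pvAloop]; simp

theorem pvAloop_snoc (xs : List String) (x : String) (cands : List String) :
    pvAloop (xs ++ [x]) cands =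
      pvAloop xs (cands ++ ["::" ++ PySem.Str.join "::" (xs ++ [x])]) := by
  rw [pvAloop]
  have hne : (xs ++ [x]).isEmpty = false := by simp
  simp [hne]

theorem pvAloop_acc (segs : List String) : ∀ (c c' : List String),
    pvAloop segs (c ++ c') = c ++ pvAloop segs c' := by
  induction segs using List.reverseRecOn with
  | nil => intro c c'; rw [pvAloop_nil, pvAloop_nil]
  | append_singleton xs x ih =>
    intro c c'
    rw [pvAloop_snoc, pvAloop_snoc, List.append_assoc]
    exact ih c (c' ++ ["::" ++ PySem.Str.join "::" (xs ++ [x])])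

theorem pvAloop_eq_revG (segs : List String) : pvAloop segs [] = (pvG "" segs).reverse := by
  induction segs using List.reverseRecOn with
  | nil => rw [pvAloop_nil]; simp [pvG]
  | append_singleton xs x ih =>
    rw [pvAloop_snoc, List.nil_append]
    rw [show ["::" ++ PySem.Str.join "::" (xs ++ [x])] =
        ["::" ++ PySem.Str.join "::" (xs ++ [x])] ++ [] from by simp,
      pvAloop_acc, ih, pvG_snoc, List.reverse_append]
    have : pvF "" (xs ++ [x]) = "::" ++ PySem.Str.join "::" (xs ++ [x]) := by
      rw [pvF_eq_join _ (by simp)]; apply String.toList_inj.mp; simp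
    simp [this]

theorem pvMain (namespace_ : String) :
    namespace_candidates_py namespace_ = namespace_candidates_py_alt namespace_ := by
  unfold namespace_candidates_py namespace_candidates_py_alt
  by_cases h :  namespace_ = "::"
  · simp [h]
  · simp only [h, if_false]
    set pieces := (PySem.Str.split? namespace_ "::").getD [] with hp
    set segs := pieces.filter (fun s => !(s == "")) with hs
    have hall : ∀ s ∈ segs, s ≠ "" := by
      intro s hmem
      have := List.of_mem_filter hmem
      simpa using this
    rw [pvBstep_skip_empty, ← hs, pvBfold_eq segs "" [] hall, pvAloop_eq_revG]
    simp

-- ===== VERDICT (by name: the statement is the Claim_ definition above) =====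
theorem namespace_candidates_py_spec : Claim_equal_namespace_candidates_py := by
  intro namespace_ _
  unfold Spec_namespace_candidates_py
  exact pvMain namespace_
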